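-- pv_equiv track=rewrite | github.com/moink/AoC2016 | day2/day2.py | follow_instruction
-- ===== SOURCE A (Python) =====
-- def follow_instruction(instruction, start_num):
--     y, x = divmod(start_num - 1, 3)
--     for direction in instruction:
--         if direction == 'R':
--             x = min(x + 1, 2)
--         elif direction == 'L':
--             x = max(x - 1, 0)
--         elif direction == 'U':
--             y = max(y - 1, 0)
--         elif direction == 'D':
--             y = min(y + 1, 2)
--     final_num = 3 * y + x + 1
--     return final_num
-- ===== SOURCE B (Python) =====
-- def follow_instruction(instruction, start_num):
--     # Compose all clamped single-axis steps into one residual map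
--     # v -> min(hi, max(lo, v + shift)) per axis, then apply it once.
--     xlo = xhi = None
--     xs = 0
--     ylo = yhi = None
--     ys = 0
--     for d in instruction:
--         if d == 'R':
--             xs += 1
--             xlo = None if xlo is None else min(xlo + 1, 2)
--             xhi = 2 if xhi is None else min(xhi + 1, 2)
--         elif d == 'L':
--             xs -= 1
--             xlo = 0 if xlo is None else max(xlo - 1, 0)
--             xhi = None if xhi is None else max(xhi - 1, 0)
--         elif d == 'U':
--             ys -= 1
--             ylo = 0 if ylo is None else max(ylo - 1, 0)
--             yhi = None if yhi is None else max(yhi - 1, 0)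
--         elif d == 'D':
--             ys += 1
--             ylo = None if ylo is None else min(ylo + 1, 2)
--             yhi = 2 if yhi is None else min(yhi + 1, 2)
--
--     def apply_map(lo, hi, shift, v):
--         v = v + shift
--         if lo is not None:
--             v = max(v, lo)
--         if hi is not None:
--             v = min(v, hi)
--         return v
--
--     y0, x0 = divmod(start_num - 1, 3)
--     return 3 * apply_map(ylo, yhi, ys, y0) + apply_map(xlo, xhi, xs, x0) + 1
-- ===== Notes on version B (the rewrite author's own statement) =====
-- stated objective: alternative
-- what changed: Instead of simulating the (y,x) state step by step, B composes all clamped per-axis step maps into one residual map min(hi, max(lo, v+shift)) per axis (a constant-size closure under composition) and applies it once to the divmod start coordinates.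
import Mathlib
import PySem

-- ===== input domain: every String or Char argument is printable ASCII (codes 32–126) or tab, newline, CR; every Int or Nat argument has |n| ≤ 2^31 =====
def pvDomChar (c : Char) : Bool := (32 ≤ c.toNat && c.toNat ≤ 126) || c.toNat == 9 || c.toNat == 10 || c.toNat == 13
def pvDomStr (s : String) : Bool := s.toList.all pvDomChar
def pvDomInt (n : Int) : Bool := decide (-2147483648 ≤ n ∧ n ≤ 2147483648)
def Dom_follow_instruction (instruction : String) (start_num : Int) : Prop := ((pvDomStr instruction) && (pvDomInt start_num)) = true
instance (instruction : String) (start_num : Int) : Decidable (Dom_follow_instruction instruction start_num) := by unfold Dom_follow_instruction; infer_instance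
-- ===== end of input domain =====

-- B replaces step-by-step state simulation by composing all clamped per-axis step
-- maps into one residual map min(hi, max(lo, v+shift)) per axis, applied once
-- to the start coordinates (alternative decomposition, same O(n) cost).


-- ===== PORT A =====
-- one loop iteration of A: state (y, x), branch order as in the Python
def fiStepA (s : Int × Int) (c : Char) : Int × Int :=
  if c = 'R' then (s.1, min (s.2 + 1) 2)
  else if c = 'L' then (s.1, max (s.2 - 1) 0)
  else if c = 'U' then (max (s.1 - 1) 0, s.2)
  else if c = 'D' then (min (s.1 + 1) 2, s.2)
  else s

-- y, x = divmod(start_num - 1, 3); divisor is the literal 3 ≠ 0, so floordiv/mod are exact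
def follow_instruction (instruction : String) (start_num : Int) : Int :=
  3 * (instruction.toList.foldl fiStepA
        (PySem.Int.floordiv (start_num - 1) 3, PySem.Int.mod (start_num - 1) 3)).1
    + (instruction.toList.foldl fiStepA
        (PySem.Int.floordiv (start_num - 1) 3, PySem.Int.mod (start_num - 1) 3)).2 + 1

-- ===== PORT B =====
-- a residual per-axis map (lo, hi, shift) meaning  v ↦ min hi (max lo (v + shift)); none = no clamp yet
-- compose v ↦ min (v+1) 2 after the map
def fiIncT (t : Option Int × Option Int × Int) : Option Int × Option Int × Int :=
  ((match t.1 with | none => none | some l => some (min (l + 1) 2)),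
   some (match t.2.1 with | none => 2 | some h => min (h + 1) 2),
   t.2.2 + 1)

-- compose v ↦ max (v-1) 0 after the map
def fiDecT (t : Option Int × Option Int × Int) : Option Int × Option Int × Int :=
  (some (match t.1 with | none => 0 | some l => max (l - 1) 0),
   (match t.2.1 with | none => none | some h => some (max (h - 1) 0)),
   t.2.2 - 1)

-- B's loop: state (x-map, y-map)
def fiStepB (t : (Option Int × Option Int × Int) × (Option Int × Option Int × Int)) (c : Char) :
    (Option Int × Option Int × Int) × (Option Int × Option Int × Int) :=
  if c = 'R' then (fiIncT t.1, t.2)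
  else if c = 'L' then (fiDecT t.1, t.2)
  else if c = 'U' then (t.1, fiDecT t.2)
  else if c = 'D' then (t.1, fiIncT t.2)
  else t

-- apply the residual map: shift, then clamp below, then clamp above (as B's apply_map)
def fiApplyT (t : Option Int × Option Int × Int) (v : Int) : Int :=
  match t.1, t.2.1 with
  | none, none => v + t.2.2
  | some l, none => max (v + t.2.2) l
  | none, some h => min (v + t.2.2) h
  | some l, some h => min (max (v + t.2.2) l) h

def follow_instruction_alt (instruction : String) (start_num : Int) : Int :=
  3 * fiApplyT (instruction.toList.foldl fiStepB ((none, none, 0), (none, none, 0))).2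
        (PySem.Int.floordiv (start_num - 1) 3)
    + fiApplyT (instruction.toList.foldl fiStepB ((none, none, 0), (none, none, 0))).1
        (PySem.Int.mod (start_num - 1) 3) + 1

-- ===== PRECONDITION & SPEC =====
def Spec_follow_instruction (instruction : String) (start_num : Int) (out : Int) : Prop := out = follow_instruction_alt instruction start_num
instance (instruction : String) (start_num : Int) (out : Int) : Decidable (Spec_follow_instruction instruction start_num out) := by unfold Spec_follow_instruction; infer_instance

-- ===== CLAIM (what is proved, stated in full; the proofs are below) =====
def Claim_equal_follow_instruction : Prop := ∀ (instruction : String) (start_num : Int), Dom_follow_instruction instruction start_num → Spec_follow_instruction instruction start_num (follow_instruction instruction start_num)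

-- ===== LEMMAS AND PROOFS =====

-- well-formed residual map: clamps in [0,2] and lo ≤ hi
def fiWf (t : Option Int × Option Int × Int) : Prop :=
  (∀ l, t.1 = some l → 0 ≤ l ∧ l ≤ 2) ∧
  (∀ h, t.2.1 = some h → 0 ≤ h ∧ h ≤ 2) ∧
  (∀ l h, t.1 = some l → t.2.1 = some h → l ≤ h)

lemma fiIncT_apply (t : Option Int × Option Int × Int) (hw : fiWf t) (v : Int) :
    fiApplyT (fiIncT t) v = min (fiApplyT t v + 1) 2 ∧ fiWf (fiIncT t) := by
  obtain ⟨lo, hi, s⟩ := t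
  obtain ⟨h1, h2, h3⟩ := hw
  cases lo <;> cases hi <;>
    simp_all [fiApplyT, fiIncT, fiWf] <;> omega

lemma fiDecT_apply (t : Option Int × Option Int × Int) (hw : fiWf t) (v : Int) :
    fiApplyT (fiDecT t) v = max (fiApplyT t v - 1) 0 ∧ fiWf (fiDecT t) := by
  obtain ⟨lo, hi, s⟩ := t
  obtain ⟨h1, h2, h3⟩ := hw
  cases lo <;> cases hi <;>
    simp_all [fiApplyT, fiDecT, fiWf] <;> omega

lemma fi_loop_inv (l : List Char) :
    ∀ (y x x0 y0 : Int) (tx ty : Option Int × Option Int × Int),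
      fiWf tx → fiWf ty → fiApplyT tx x0 = x → fiApplyT ty y0 = y →
      fiApplyT (l.foldl fiStepB (tx, ty)).1 x0 = (l.foldl fiStepA (y, x)).2 ∧
      fiApplyT (l.foldl fiStepB (tx, ty)).2 y0 = (l.foldl fiStepA (y, x)).1 := by
  induction l with
  | nil => intro y x x0 y0 tx ty _ _ hx hy; simpa using ⟨hx, hy⟩
  | cons c l ih =>
    intro y x x0 y0 tx ty hwx hwy hx hy
    simp only [List.foldl_cons]
    by_cases hR : c = 'R'
    · obtain ⟨ha, hw⟩ := fiIncT_apply tx hwx x0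
      simp only [fiStepA, fiStepB, hR]
      exact ih y (min (x + 1) 2) x0 y0 (fiIncT tx) ty hw hwy (by rw [ha, hx]) hy
    by_cases hL : c = 'L'
    · obtain ⟨ha, hw⟩ := fiDecT_apply tx hwx x0
      simp only [fiStepA, fiStepB, hL, reduceIte]
      exact ih y (max (x - 1) 0) x0 y0 (fiDecT tx) ty hw hwy (by rw [ha, hx]) hy
    by_cases hU : c = 'U'
    · obtain ⟨ha, hw⟩ := fiDecT_apply ty hwy y0
      simp only [fiStepA, fiStepB, hU, reduceIte]
      exact ih (max (y - 1) 0) x x0 y0 tx (fiDecT ty) hwx hw hx (by rw [ha, hy])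
    by_cases hD : c = 'D'
    · obtain ⟨ha, hw⟩ := fiIncT_apply ty hwy y0
      simp only [fiStepA, fiStepB, hD, reduceIte]
      exact ih (min (y + 1) 2) x x0 y0 tx (fiIncT ty) hwx hw hx (by rw [ha, hy])
    · simp only [fiStepA, fiStepB, hR, hL, hU, hD, reduceIte]
      exact ih y x x0 y0 tx ty hwx hwy hx hy

-- ===== VERDICT (by name: the statement is the Claim_ definition above) =====
theorem follow_instruction_spec : Claim_equal_follow_instruction := by
  intro instruction start_num _
  unfold Spec_follow_instruction follow_instruction follow_instruction_alt
  have hwf : fiWf ((none : Option Int), (none : Option Int), (0 : Int)) := by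
    refine ⟨?_, ?_, ?_⟩ <;> intro _ <;> simp
  have h := fi_loop_inv instruction.toList
      (PySem.Int.floordiv (start_num - 1) 3) (PySem.Int.mod (start_num - 1) 3)
      (PySem.Int.mod (start_num - 1) 3) (PySem.Int.floordiv (start_num - 1) 3)
      (none, none, 0) (none, none, 0) hwf hwf (by simp [fiApplyT]) (by simp [fiApplyT])
  rw [h.1, h.2]
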